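-- pv_equiv track=rewrite | github.com/frendsick/torth | utils/lex.py | get_tokens_from_function
-- ===== SOURCE A (Python) =====
-- from typing import Dict, Iterator, List
--
-- def get_tokens_from_function(func_ops: List[str], defined_functions: Dict[str, List[str]]) -> List[str]:
--     func_tokens: List[str] = []
--     for op in func_ops:
--         if op in defined_functions:
--             func_tokens += get_tokens_from_function(defined_functions[op], defined_functions)
--         else:
--             func_tokens.append(op)
--     return func_tokens
-- ===== SOURCE B (Python) =====
-- def get_tokens_from_function(func_ops, defined_functions):
--     # Stage 1 (Kahn-style): repeatedly flatten every function whose body references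
--     # only already-flattened functions, until no more can be flattened.
--     flat = {}
--     changed = True
--     while changed:
--         changed = False
--         for name, ops in defined_functions.items():
--             if name in flat:
--                 continue
--             if all(op not in defined_functions or op in flat for op in ops):
--                 flat[name] = [t for op in ops
--                                 for t in (flat[op] if op in defined_functions else (op,))]
--                 changed = True
--     # Stage 2: a single pass over func_ops splicing in the precomputed expansions.
--     return [t for op in func_ops
--               for t in (flat[op] if op in defined_functions else (op,))]
-- ===== Notes on version B (the rewrite author's own statement) =====
-- stated objective: alternative
-- what changed: B replaces A's naive top-down recursion (which re-expands a shared function at every call site) by a two-stage algorithm: a Kahn-style bottom-up fixpoint that flattens each defined function's body exactly once over the call DAG, then a single splice pass over func_ops.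
import Mathlib
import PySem

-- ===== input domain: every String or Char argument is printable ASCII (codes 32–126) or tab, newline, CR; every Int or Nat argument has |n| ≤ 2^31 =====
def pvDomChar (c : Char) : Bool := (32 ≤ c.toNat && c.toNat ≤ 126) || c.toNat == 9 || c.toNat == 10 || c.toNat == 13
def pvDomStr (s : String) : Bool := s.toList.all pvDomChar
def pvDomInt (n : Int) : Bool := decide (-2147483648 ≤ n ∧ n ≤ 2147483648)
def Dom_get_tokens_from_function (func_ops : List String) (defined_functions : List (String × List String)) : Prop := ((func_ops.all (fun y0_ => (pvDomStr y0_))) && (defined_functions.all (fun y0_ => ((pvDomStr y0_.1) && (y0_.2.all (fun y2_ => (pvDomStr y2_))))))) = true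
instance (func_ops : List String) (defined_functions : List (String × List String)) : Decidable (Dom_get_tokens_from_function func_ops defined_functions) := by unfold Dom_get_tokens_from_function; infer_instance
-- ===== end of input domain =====

-- B replaces A's naive recursion by a two-stage pass: a Kahn-style fixpoint that flattens each
-- defined function's body exactly once (bottom-up over the call DAG), then one splice pass over
-- func_ops; Pre_ excludes duplicate keys and cyclic call graphs (Python A raises RecursionError there).

-- ===== PORT A =====
-- The `allowed` set is a totality guard only: it shrinks along a recursion path and, on inputs
-- satisfying Pre_ (well-founded call graph), the `op ∈ allowed` test is always true (proved below).
def pvGoA (dfs : List (String × List String)) : List String → List String → List String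
  | _, [] => []
  | allowed, op :: rest =>
    match dfs.lookup op with
    | some body =>
        (if h : op ∈ allowed then pvGoA dfs (allowed.erase op) body else []) ++ pvGoA dfs allowed rest
    | none => op :: pvGoA dfs allowed rest
termination_by allowed ops => (allowed.length, ops.length)
decreasing_by
  all_goals first
    | exact Prod.Lex.left _ _ (by have := List.length_erase_of_mem h; have := List.length_pos_of_mem h; omega)
    | exact Prod.Lex.right _ (by simp)

def get_tokens_from_function (func_ops : List String) (defined_functions : List (String × List String)) : List String :=
  pvGoA defined_functions (defined_functions.map Prod.fst) func_ops

-- ===== PORT B =====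
-- the `all(op not in defined_functions or op in flat for op in ops)` readiness test
def pvReady (dfs : List (String × List String)) (flat : PySem.Dict String (List String)) (ops : List String) : Bool :=
  ops.all (fun op => (dfs.lookup op).isNone || (flat.get? op).isSome)

-- the splice comprehension `[t for op in ops for t in (flat[op] if op in defined_functions else (op,))]`
def pvSplice (dfs : List (String × List String)) (flat : PySem.Dict String (List String)) (ops : List String) : List String :=
  ops.flatMap (fun op => if (dfs.lookup op).isSome then (flat.get? op).getD [] else [op])

-- one pass of the inner `for name, ops in defined_functions.items()` loop
def pvRoundB (dfs : List (String × List String)) :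
    List (String × List String) → PySem.Dict String (List String) × Bool → PySem.Dict String (List String) × Bool
  | [], st => st
  | (name, ops) :: rest, (flat, ch) =>
    if (flat.get? name).isSome then pvRoundB dfs rest (flat, ch)
    else if pvReady dfs flat ops then
      pvRoundB dfs rest (flat.insert name (pvSplice dfs flat ops), true)
    else pvRoundB dfs rest (flat, ch)

-- the `while changed` loop; each productive round adds a key, so |dfs|+1 rounds always suffice
def pvLoopB (dfs : List (String × List String)) : Nat → PySem.Dict String (List String) → PySem.Dict String (List String)
  | 0, flat => flat
  | fuel + 1, flat =>
    let st := pvRoundB dfs dfs (flat, false)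
    if st.2 then pvLoopB dfs fuel st.1 else st.1

def get_tokens_from_function_alt (func_ops : List String) (defined_functions : List (String × List String)) : List String :=
  pvSplice defined_functions (pvLoopB defined_functions (defined_functions.length + 1) PySem.Dict.empty) func_ops

-- ===== PRECONDITION & SPEC =====
-- pvOkSet dfs n = the defined-function names whose expansion call graph is well-founded with depth ≤ n
-- (the bounded least fixpoint of "all defined functions referenced by the body are already ok").
def pvOkSet (dfs : List (String × List String)) : Nat → List String
  | 0 => []
  | n + 1 =>
    (dfs.map Prod.fst).filter (fun k =>
      ((dfs.lookup k).getD []).all (fun op => (dfs.lookup op).isNone || decide (op ∈ pvOkSet dfs n)))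

-- Pre_ excludes (a) duplicate keys in the association list, where first-vs-last lookup is ambiguous
-- (a Python dict cannot carry them), and (b) inputs whose call graph reachable from func_ops is
-- cyclic — there Python A raises RecursionError.
def Pre_get_tokens_from_function (func_ops : List String) (defined_functions : List (String × List String)) : Prop :=
  (defined_functions.map Prod.fst).Nodup ∧
  ∀ op ∈ func_ops, (defined_functions.lookup op).isSome → op ∈ pvOkSet defined_functions defined_functions.length
instance (func_ops : List String) (defined_functions : List (String × List String)) : Decidable (Pre_get_tokens_from_function func_ops defined_functions) := by unfold Pre_get_tokens_from_function; infer_instance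

def pvWitness_get_tokens_from_function : List String × (List (String × List String)) :=
  (["a", "f"], [("f", ["dup", "g"]), ("g", ["x"])])

def Spec_get_tokens_from_function (func_ops : List String) (defined_functions : List (String × List String)) (out : List String) : Prop := out = get_tokens_from_function_alt func_ops defined_functions
instance (func_ops : List String) (defined_functions : List (String × List String)) (out : List String) : Decidable (Spec_get_tokens_from_function func_ops defined_functions out) := by unfold Spec_get_tokens_from_function; infer_instance

-- ===== CLAIM (what is proved, stated in full; the proofs are below) =====
def Claim_equal_get_tokens_from_function : Prop := ∀ (func_ops : List String) (defined_functions : List (String × List String)), Dom_get_tokens_from_function func_ops defined_functions → Pre_get_tokens_from_function func_ops defined_functions → Spec_get_tokens_from_function func_ops defined_functions (get_tokens_from_function func_ops defined_functions)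

-- ===== LEMMAS AND PROOFS =====

theorem pvOkSet_subset_keys (dfs : List (String × List String)) (n : Nat) :
    pvOkSet dfs n ⊆ dfs.map Prod.fst := by
  cases n with
  | zero => simp [pvOkSet]
  | succ n => exact fun x hx => (List.mem_filter.mp hx).1

theorem pvOkSet_mem_succ (dfs : List (String × List String)) (n : Nat) (k : String) :
    k ∈ pvOkSet dfs (n + 1) ↔ k ∈ dfs.map Prod.fst ∧
      ∀ op ∈ (dfs.lookup k).getD [], (dfs.lookup op).isNone = true ∨ op ∈ pvOkSet dfs n := by
  have e : pvOkSet dfs (n + 1) = (dfs.map Prod.fst).filter (fun k =>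
      ((dfs.lookup k).getD []).all
        (fun op => (dfs.lookup op).isNone || decide (op ∈ pvOkSet dfs n))) := rfl
  rw [e]
  simp only [List.mem_filter, List.all_eq_true, Bool.or_eq_true, decide_eq_true_eq]

theorem pvOkSet_subset_succ (dfs : List (String × List String)) (n : Nat) :
    pvOkSet dfs n ⊆ pvOkSet dfs (n + 1) := by
  induction n with
  | zero => simp [pvOkSet]
  | succ n ih =>
    intro k hk
    rw [pvOkSet_mem_succ] at hk ⊢
    refine ⟨hk.1, fun op hop => ?_⟩
    rcases hk.2 op hop with h | h
    · exact Or.inl h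
    · exact Or.inr (ih h)

theorem pvOkSet_mono (dfs : List (String × List String)) {n m : Nat} (h : n ≤ m) :
    pvOkSet dfs n ⊆ pvOkSet dfs m := by
  induction m with
  | zero => simpa [Nat.le_zero.mp h] using fun x hx => hx
  | succ m ih =>
    rcases Nat.lt_or_ge n (m + 1) with h' | h'
    · exact fun x hx => pvOkSet_subset_succ dfs m (ih (Nat.lt_succ_iff.mp h') hx)
    · have : n = m + 1 := Nat.le_antisymm h h'
      subst this; exact fun x hx => hx

theorem pvOkSet_body (dfs : List (String × List String)) (n : Nat) (k : String)
    (hk : k ∈ pvOkSet dfs (n + 1)) :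
    ∀ op ∈ (dfs.lookup k).getD [], (dfs.lookup op).isSome → op ∈ pvOkSet dfs n := by
  intro op hop hsome
  rcases ((pvOkSet_mem_succ dfs n k).mp hk).2 op hop with h | h
  · simp [Option.isNone_iff_eq_none.mp h] at hsome
  · exact h

theorem pvRank (dfs : List (String × List String)) (op : String) (B : Nat)
    (h : op ∈ pvOkSet dfs B) :
    ∃ r, r < B ∧ op ∈ pvOkSet dfs (r + 1) ∧ op ∉ pvOkSet dfs r := by
  induction B with
  | zero => simp [pvOkSet] at h
  | succ B ih =>
    by_cases hB : op ∈ pvOkSet dfs B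
    · obtain ⟨r, h1, h2, h3⟩ := ih hB
      exact ⟨r, Nat.lt_succ_of_lt h1, h2, h3⟩
    · exact ⟨B, Nat.lt_succ_self B, h, hB⟩

def pvOpsOK (dfs : List (String × List String)) (B : Nat) (ops : List String) : Prop :=
  ∀ op ∈ ops, (dfs.lookup op).isSome → op ∈ pvOkSet dfs B

def pvGood (dfs : List (String × List String)) (B : Nat) (allowed : List String) : Prop :=
  ∀ k ∈ pvOkSet dfs B, k ∈ allowed

theorem pvGood_erase (dfs : List (String × List String)) {B r : Nat} {allowed : List String}
    {op : String} (hg : pvGood dfs B allowed) (hrB : r ≤ B) (hnot : op ∉ pvOkSet dfs r) :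
    pvGood dfs r (allowed.erase op) := by
  intro k hk
  have hkB : k ∈ pvOkSet dfs B := pvOkSet_mono dfs hrB hk
  have hne : k ≠ op := fun e => hnot (e ▸ hk)
  exact List.mem_erase_of_ne hne |>.mpr (hg k hkB)

theorem pvGoA_irrel (dfs : List (String × List String)) :
    ∀ B ops a1 a2, pvOpsOK dfs B ops → pvGood dfs B a1 → pvGood dfs B a2 →
      pvGoA dfs a1 ops = pvGoA dfs a2 ops := by
  intro B
  induction B using Nat.strong_induction_on with
  | _ B ihB =>
    intro ops
    induction ops with
    | nil => intro a1 a2 _ _ _; simp [pvGoA]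
    | cons op rest ihr =>
      intro a1 a2 hops hg1 hg2
      have hrest : pvOpsOK dfs B rest := fun o ho hs => hops o (List.mem_cons_of_mem _ ho) hs
      cases hl : dfs.lookup op with
      | none =>
        simp only [pvGoA, hl]
        exact congrArg _ (ihr a1 a2 hrest hg1 hg2)
      | some body =>
        have hsome : (dfs.lookup op).isSome := by simp [hl]
        have hok : op ∈ pvOkSet dfs B := hops op (List.mem_cons_self) hsome
        obtain ⟨r, hrB, hr1, hr0⟩ := pvRank dfs op B hok
        have h1 : op ∈ a1 := hg1 op hok
        have h2 : op ∈ a2 := hg2 op hok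
        have hbody : pvOpsOK dfs r body := by
          intro o ho hs
          exact pvOkSet_body dfs r op hr1 o (by simpa [hl] using ho) hs
        have e1 := ihB r hrB body (a1.erase op) (a2.erase op) hbody
          (pvGood_erase dfs hg1 (Nat.le_of_lt hrB) hr0)
          (pvGood_erase dfs hg2 (Nat.le_of_lt hrB) hr0)
        simp only [pvGoA, hl, h1, h2, dite_true]
        rw [e1, ihr a1 a2 hrest hg1 hg2]

-- the full expansion of a defined function's body, as A computes it
def pvExp (dfs : List (String × List String)) (op : String) : List String :=
  pvGoA dfs ((dfs.map Prod.fst).erase op) ((dfs.lookup op).getD [])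

-- invariant of B's table: every cached entry is a defined, well-founded function mapped to its full expansion
def pvFlatOK (dfs : List (String × List String)) (flat : PySem.Dict String (List String)) : Prop :=
  ∀ op toks, flat.get? op = some toks →
    (dfs.lookup op).isSome = true ∧ (∃ n, op ∈ pvOkSet dfs n) ∧ toks = pvExp dfs op

def pvMissing (dfs : List (String × List String)) (flat : PySem.Dict String (List String)) : Nat :=
  ((dfs.map Prod.fst).filter (fun k => (flat.get? k).isNone)).length

theorem pvLookup_of_mem_nodup {l : List (String × List String)} {k : String} {v : List String}
    (hnd : (l.map Prod.fst).Nodup) (h : (k, v) ∈ l) : l.lookup k = some v := by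
  induction l with
  | nil => simp at h
  | cons p t ih =>
    have hnd' : (∀ x : List String, (p.1, x) ∉ t) ∧ (t.map Prod.fst).Nodup := by
      simpa using hnd
    rcases List.mem_cons.mp h with he | h'
    · rw [← he]
      simp [List.lookup]
    · have hne : (k == p.1) = false := by
        apply beq_eq_false_iff_ne.mpr
        intro hk
        exact hnd'.1 v (by rw [hk] at h'; exact h')
      simpa [List.lookup, hne] using ih hnd'.2 h'

theorem pvOkBound (dfs : List (String × List String)) :
    ∀ ops : List String, (∀ op ∈ ops, (dfs.lookup op).isSome → ∃ n, op ∈ pvOkSet dfs n) →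
      ∃ N, pvOpsOK dfs N ops := by
  intro ops
  induction ops with
  | nil => exact fun _ => ⟨0, by intro o ho; simp at ho⟩
  | cons op rest ih =>
    intro h
    obtain ⟨N, hN⟩ := ih fun o ho hs => h o (List.mem_cons_of_mem _ ho) hs
    by_cases hs : (dfs.lookup op).isSome
    · obtain ⟨m, hm⟩ := h op List.mem_cons_self hs
      refine ⟨max N m, ?_⟩
      intro o ho hso
      rcases List.mem_cons.mp ho with rfl | ho'
      · exact pvOkSet_mono dfs (Nat.le_max_right _ _) hm
      · exact pvOkSet_mono dfs (Nat.le_max_left _ _) (hN o ho' hso)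
    · refine ⟨N, ?_⟩
      intro o ho hso
      rcases List.mem_cons.mp ho with rfl | ho'
      · exact absurd hso hs
      · exact hN o ho' hso

-- A's expansion of a list of ops, written as one flatMap over per-function expansions
theorem pvGoA_flatMap (dfs : List (String × List String)) (r : Nat) :
    ∀ ops allowed, pvOpsOK dfs r ops → pvGood dfs r allowed →
      pvGoA dfs allowed ops = ops.flatMap (fun op =>
        match dfs.lookup op with
        | some _ => pvExp dfs op
        | none => [op]) := by
  intro ops
  induction ops with
  | nil => intro allowed _ _; simp [pvGoA]
  | cons op rest ih =>
    intro allowed hops hg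
    have hrest : pvOpsOK dfs r rest := fun o ho hs => hops o (List.mem_cons_of_mem _ ho) hs
    cases hl : dfs.lookup op with
    | none =>
      simp only [pvGoA, hl, List.flatMap_cons]
      rw [ih allowed hrest hg]
      rfl
    | some body =>
      have hsome : (dfs.lookup op).isSome := by simp [hl]
      have hok : op ∈ pvOkSet dfs r := hops op List.mem_cons_self hsome
      obtain ⟨r', hr'B, hr1, hr0⟩ := pvRank dfs op r hok
      have hmem : op ∈ allowed := hg op hok
      have hbody : pvOpsOK dfs r' body := by
        intro o ho hs
        exact pvOkSet_body dfs r' op hr1 o (by simpa [hl] using ho) hs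
      have hg' : pvGood dfs r' allowed := fun k hk => hg k (pvOkSet_mono dfs (Nat.le_of_lt hr'B) hk)
      have hgk : pvGood dfs r' (dfs.map Prod.fst) := fun k hk => pvOkSet_subset_keys dfs r' hk
      have e := pvGoA_irrel dfs r' body (allowed.erase op) ((dfs.map Prod.fst).erase op) hbody
        (pvGood_erase dfs hg' (Nat.le_refl _) hr0)
        (pvGood_erase dfs hgk (Nat.le_refl _) hr0)
      simp only [pvGoA, hl, hmem, dite_true, List.flatMap_cons]
      rw [e, ih allowed hrest hg]
      have : pvExp dfs op = pvGoA dfs ((dfs.map Prod.fst).erase op) body := by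
        simp [pvExp, hl]
      rw [this]

-- the splice pass agrees with the canonical flatMap whenever every defined op is cached
theorem pvSplice_eq_flatMap (dfs : List (String × List String))
    (flat : PySem.Dict String (List String)) (hf : pvFlatOK dfs flat) :
    ∀ ops, (∀ op ∈ ops, (dfs.lookup op).isSome → (flat.get? op).isSome) →
      pvSplice dfs flat ops = ops.flatMap (fun op =>
        match dfs.lookup op with
        | some _ => pvExp dfs op
        | none => [op]) := by
  intro ops
  induction ops with
  | nil => intro _; simp [pvSplice]
  | cons op rest ih =>
    intro h
    have hrest := ih fun o ho hs => h o (List.mem_cons_of_mem _ ho) hs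
    simp only [pvSplice, List.flatMap_cons] at *
    rw [hrest]
    cases hl : dfs.lookup op with
    | none => simp [hl]
    | some body =>
      have hs : (flat.get? op).isSome := h op List.mem_cons_self (by simp [hl])
      obtain ⟨toks, htoks⟩ := Option.isSome_iff_exists.mp hs
      have := (hf op toks htoks).2.2
      simp [hl, htoks, this]

-- a newly ready entry gets exactly its full expansion
theorem pvInsert_value (dfs : List (String × List String)) (hnd : (dfs.map Prod.fst).Nodup)
    (flat : PySem.Dict String (List String)) (hf : pvFlatOK dfs flat)
    {name : String} {ops : List String} (hmem : (name, ops) ∈ dfs)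
    (hready : pvReady dfs flat ops = true) :
    pvSplice dfs flat ops = pvExp dfs name ∧ ∃ n, name ∈ pvOkSet dfs n := by
  have hlook : dfs.lookup name = some ops := pvLookup_of_mem_nodup hnd hmem
  have hcached : ∀ op ∈ ops, (dfs.lookup op).isSome → (flat.get? op).isSome := by
    intro op hop hs
    have h0 := List.all_eq_true.mp hready op hop
    rcases (by simpa using h0 :
        (dfs.lookup op).isNone = true ∨ ((flat.get? op).isSome = true)) with h | h
    · simp [Option.isNone_iff_eq_none.mp h] at hs
    · exact h
  obtain ⟨N, hN⟩ := pvOkBound dfs ops (by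
    intro op hop hs
    obtain ⟨toks, htoks⟩ := Option.isSome_iff_exists.mp (hcached op hop hs)
    exact (hf op toks htoks).2.1)
  have hnameOk : name ∈ pvOkSet dfs (N + 1) := by
    rw [pvOkSet_mem_succ]
    refine ⟨List.mem_map.mpr ⟨(name, ops), hmem, rfl⟩, ?_⟩
    intro op hop
    rw [hlook] at hop
    by_cases hs : (dfs.lookup op).isSome
    · exact Or.inr (hN op hop hs)
    · exact Or.inl (by simpa [Option.isNone_iff_eq_none] using Option.not_isSome_iff_eq_none.mp hs)
  obtain ⟨r, hrN, hr1, hr0⟩ := pvRank dfs name (N + 1) hnameOk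
  have hbody : pvOpsOK dfs r ops := by
    intro o ho hs
    exact pvOkSet_body dfs r name hr1 o (by simpa [hlook] using ho) hs
  have hgk : pvGood dfs r ((dfs.map Prod.fst).erase name) :=
    pvGood_erase dfs (fun k hk => pvOkSet_subset_keys dfs r hk) (Nat.le_refl _) hr0
  constructor
  · rw [pvSplice_eq_flatMap dfs flat hf ops hcached,
      ← pvGoA_flatMap dfs r ops ((dfs.map Prod.fst).erase name) hbody hgk]
    simp [pvExp, hlook]
  · exact ⟨N + 1, hnameOk⟩

-- the round invariant: soundness, preservation of existing entries, and a new key on change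
theorem pvRoundB_inv (dfs : List (String × List String)) (hnd : (dfs.map Prod.fst).Nodup) :
    ∀ rest flat ch, (∀ p ∈ rest, p ∈ dfs) → pvFlatOK dfs flat →
      pvFlatOK dfs (pvRoundB dfs rest (flat, ch)).1 ∧
      (∀ k, (flat.get? k).isSome → (pvRoundB dfs rest (flat, ch)).1.get? k = flat.get? k) ∧
      ((pvRoundB dfs rest (flat, ch)).2 = true → ch = true ∨
        ∃ k ∈ dfs.map Prod.fst, flat.get? k = none ∧ ((pvRoundB dfs rest (flat, ch)).1.get? k).isSome) := by
  intro rest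
  induction rest with
  | nil => intro flat ch _ hf; exact ⟨hf, fun _ _ => rfl, fun h => Or.inl h⟩
  | cons p rest ih =>
    intro flat ch hsub hf
    obtain ⟨name, ops⟩ := p
    have hmem : (name, ops) ∈ dfs := hsub _ List.mem_cons_self
    have hsub' : ∀ q ∈ rest, q ∈ dfs := fun q hq => hsub q (List.mem_cons_of_mem _ hq)
    by_cases h1 : (flat.get? name).isSome
    · simpa [pvRoundB, h1] using ih flat ch hsub' hf
    · have hnone : flat.get? name = none := Option.not_isSome_iff_eq_none.mp h1
      by_cases h2 : pvReady dfs flat ops = true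
      · obtain ⟨hval, hok⟩ := pvInsert_value dfs hnd flat hf hmem h2
        set flat' := flat.insert name (pvSplice dfs flat ops) with hflat'
        have hf' : pvFlatOK dfs flat' := by
          intro op toks htoks
          by_cases he : op = name
          · subst he
            rw [hflat', PySem.Dict.get?_insert_self] at htoks
            injection htoks with htoks
            refine ⟨by simp [pvLookup_of_mem_nodup hnd hmem], hok, ?_⟩
            rw [← htoks, hval]
          · rw [hflat', PySem.Dict.get?_insert_of_ne _ _ he] at htoks
            exact hf op toks htoks
        obtain ⟨ha, hb, hc⟩ := ih flat' true hsub' hf'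
        refine ⟨by simpa [pvRoundB, h1, h2] using ha, ?_, ?_⟩
        · intro k hk
          have hkne : k ≠ name := fun e => by rw [e, hnone] at hk; simp at hk
          have : flat'.get? k = flat.get? k := PySem.Dict.get?_insert_of_ne _ _ hkne
          simpa [pvRoundB, h1, h2, this] using hb k (by rwa [this])
        · intro _
          refine Or.inr ⟨name, List.mem_map.mpr ⟨(name, ops), hmem, rfl⟩, hnone, ?_⟩
          have hsome' : (flat'.get? name).isSome := by simp [hflat', PySem.Dict.get?_insert_self]
          have heq := hb name hsome'
          simpa [pvRoundB, h1, h2, ← hflat', heq] using hsome'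
      · have := ih flat ch hsub' hf
        simpa [pvRoundB, h1, h2] using this

theorem pvRoundB_true (dfs : List (String × List String)) :
    ∀ rest flat, (pvRoundB dfs rest (flat, true)).2 = true := by
  intro rest
  induction rest with
  | nil => intro flat; rfl
  | cons p rest ih =>
    intro flat
    obtain ⟨name, ops⟩ := p
    by_cases h1 : (flat.get? name).isSome
    · simpa [pvRoundB, h1] using ih flat
    · by_cases h2 : pvReady dfs flat ops = true
      · simpa [pvRoundB, h1, h2] using ih _
      · simpa [pvRoundB, h1, h2] using ih flat

-- a round that reports no change left the table unchanged and found nothing ready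
theorem pvRoundB_false (dfs : List (String × List String)) :
    ∀ rest flat, (pvRoundB dfs rest (flat, false)).2 = false →
      (pvRoundB dfs rest (flat, false)).1 = flat ∧
      ∀ name ops, (name, ops) ∈ rest → flat.get? name = none → pvReady dfs flat ops = false := by
  intro rest
  induction rest with
  | nil => intro flat _; exact ⟨rfl, by intro _ _ h; simp at h⟩
  | cons p rest ih =>
    intro flat hfalse
    obtain ⟨name, ops⟩ := p
    by_cases h1 : (flat.get? name).isSome
    · obtain ⟨ha, hb⟩ := ih flat (by simpa [pvRoundB, h1] using hfalse)
      refine ⟨by simpa [pvRoundB, h1] using ha, ?_⟩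
      intro n o hmem hnone
      rcases List.mem_cons.mp hmem with ⟨rfl, rfl⟩ | h'
      · rw [hnone] at h1; simp at h1
      · exact hb n o h' hnone
    · by_cases h2 : pvReady dfs flat ops = true
      · exfalso
        have heq : pvRoundB dfs ((name, ops) :: rest) (flat, false)
            = pvRoundB dfs rest (flat.insert name (pvSplice dfs flat ops), true) := by
          simp [pvRoundB, h1, h2]
        rw [heq] at hfalse
        simp [pvRoundB_true] at hfalse
      · obtain ⟨ha, hb⟩ := ih flat (by simpa [pvRoundB, h1, h2] using hfalse)
        refine ⟨by simpa [pvRoundB, h1, h2] using ha, ?_⟩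
        intro n o hmem hnone
        rcases List.mem_cons.mp hmem with ⟨rfl, rfl⟩ | h'
        · simpa using h2
        · exact hb n o h' hnone

-- if nothing is ready, the table already contains every well-founded function
theorem pvComplete (dfs : List (String × List String)) (hnd : (dfs.map Prod.fst).Nodup)
    (flat : PySem.Dict String (List String))
    (hstall : ∀ name ops, (name, ops) ∈ dfs → flat.get? name = none → pvReady dfs flat ops = false) :
    ∀ n k, k ∈ pvOkSet dfs n → (flat.get? k).isSome := by
  intro n
  induction n with
  | zero => intro k hk; simp [pvOkSet] at hk
  | succ n ih =>
    intro k hk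
    obtain ⟨hkeys, hcond⟩ := (pvOkSet_mem_succ dfs n k).mp hk
    obtain ⟨⟨k', ops⟩, hmem, hfst⟩ := List.mem_map.mp hkeys
    have hfst' : k' = k := hfst
    rw [hfst'] at hmem
    have hlook : dfs.lookup k = some ops := pvLookup_of_mem_nodup hnd hmem
    have hready : pvReady dfs flat ops = true := by
      apply List.all_eq_true.mpr
      intro op hop
      rcases hcond op (by simpa [hlook] using hop) with h | h
      · simp [h]
      · simp [ih op h]
    by_cases hs : (flat.get? k).isSome
    · exact hs
    · exact absurd hready (by simp [hstall k ops hmem (Option.not_isSome_iff_eq_none.mp hs)])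

theorem pvFilter_length_le {α : Type} (l : List α) (p q : α → Bool)
    (h : ∀ x ∈ l, q x → p x) : (l.filter q).length ≤ (l.filter p).length := by
  induction l with
  | nil => simp
  | cons a t ih =>
    have ht := ih fun x hx => h x (List.mem_cons_of_mem _ hx)
    by_cases hq : q a
    · simp [List.filter_cons, hq, h a List.mem_cons_self hq]; omega
    · by_cases hp : p a <;> simp [List.filter_cons, hq, hp] <;> omega

theorem pvFilter_length_lt {α : Type} (l : List α) (p q : α → Bool)
    (h : ∀ x ∈ l, q x → p x) (x0 : α) (hx0 : x0 ∈ l) (hp : p x0 = true) (hq : q x0 = false) :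
    (l.filter q).length < (l.filter p).length := by
  induction l with
  | nil => simp at hx0
  | cons a t ih =>
    have hle := pvFilter_length_le t p q fun x hx => h x (List.mem_cons_of_mem _ hx)
    rcases List.mem_cons.mp hx0 with rfl | hx0'
    · simp [List.filter_cons, hp, hq]; omega
    · have := ih (fun x hx => h x (List.mem_cons_of_mem _ hx)) hx0'
      by_cases hqa : q a
      · simp [List.filter_cons, hqa, h a List.mem_cons_self hqa]; omega
      · by_cases hpa : p a <;> simp [List.filter_cons, hqa, hpa] <;> omega

theorem pvLoopB_spec (dfs : List (String × List String)) (hnd : (dfs.map Prod.fst).Nodup) :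
    ∀ fuel flat, pvFlatOK dfs flat → pvMissing dfs flat < fuel →
      pvFlatOK dfs (pvLoopB dfs fuel flat) ∧
      ∀ n k, k ∈ pvOkSet dfs n → ((pvLoopB dfs fuel flat).get? k).isSome := by
  intro fuel
  induction fuel with
  | zero => intro flat _ h; omega
  | succ fuel ih =>
    intro flat hf hmiss
    obtain ⟨ha, hb, hc⟩ := pvRoundB_inv dfs hnd dfs flat false (fun p hp => hp) hf
    cases hst : (pvRoundB dfs dfs (flat, false)).2 with
    | false =>
      obtain ⟨heq, hstall⟩ := pvRoundB_false dfs dfs flat hst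
      have hres : pvLoopB dfs (fuel + 1) flat = flat := by
        simp [pvLoopB, hst, heq]
      rw [hres]
      exact ⟨hf, pvComplete dfs hnd flat hstall⟩
    | true =>
      rcases hc hst with h | ⟨k0, hk0keys, hk0none, hk0some⟩
      · exact absurd h (by simp)
      · have hdec : pvMissing dfs (pvRoundB dfs dfs (flat, false)).1 < pvMissing dfs flat := by
          apply pvFilter_length_lt
          · intro x hx hqx
            by_cases hfx : (flat.get? x).isSome
            · rw [hb x hfx] at hqx
              simp [Option.isNone_iff_eq_none.mp hqx] at hfx
            · simpa [Option.isNone_iff_eq_none] using Option.not_isSome_iff_eq_none.mp hfx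
          · exact hk0keys
          · simp [hk0none]
          · simpa [Option.isNone_iff_eq_none] using hk0some
        have := ih (pvRoundB dfs dfs (flat, false)).1 ha (by omega)
        simpa [pvLoopB, hst] using this

-- ===== VERDICT (by name: the statement is the Claim_ definition above) =====
theorem get_tokens_from_function_spec : Claim_equal_get_tokens_from_function := by
  intro func_ops dfs _ hpre
  unfold Spec_get_tokens_from_function get_tokens_from_function get_tokens_from_function_alt
  obtain ⟨hnd, hok⟩ := hpre
  have hempty : pvFlatOK dfs PySem.Dict.empty := by
    intro op toks h
    simp [PySem.Dict.get?_empty] at h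
  have hmiss : pvMissing dfs PySem.Dict.empty < dfs.length + 1 := by
    have := pvFilter_length_le (dfs.map Prod.fst)
      (fun _ => true) (fun k => (((PySem.Dict.empty : PySem.Dict String (List String)).get? k)).isNone) (by simp)
    simp only [pvMissing]
    simp only [List.filter_true, List.length_map] at this
    omega
  obtain ⟨hflat, hcomp⟩ := pvLoopB_spec dfs hnd (dfs.length + 1) PySem.Dict.empty hempty hmiss
  have hops : pvOpsOK dfs dfs.length func_ops := fun o ho hs => hok o ho hs
  have hcached : ∀ op ∈ func_ops, (dfs.lookup op).isSome →
      ((pvLoopB dfs (dfs.length + 1) PySem.Dict.empty).get? op).isSome := by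
    intro op hop hs
    exact hcomp dfs.length op (hok op hop hs)
  rw [pvSplice_eq_flatMap dfs _ hflat func_ops hcached,
    ← pvGoA_flatMap dfs dfs.length func_ops (dfs.map Prod.fst) hops
      (fun k hk => pvOkSet_subset_keys dfs _ hk)]
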